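-- pv_equiv track=rewrite | github.com/trishalapiz/CS373-2021 | Image Processing Assignment/QRCodeDetection.py | createZeroPaddedPixelArray
-- ===== SOURCE A (Python) =====
-- def createZeroPaddedPixelArray(pixel_array, image_width, image_height):
--     new_width = image_width + 2
--     new_height = image_height + 2
--
--     padded_array = [[0 for x in range(new_width)] for y in range(new_height)]
--     #fill in values from pixel_array
--     for i in range(1,image_height+1):
--         for j in range(1,image_width+1):
--             padded_array[i][j] = pixel_array[i-1][j-1]
--
--     return padded_array
-- ===== SOURCE B (Python) =====
-- def createZeroPaddedPixelArray(pixel_array, image_width, image_height):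
--     new_width = image_width + 2
--     return [[0] * new_width if i == 0 or i == image_height + 1
--             else [0] + pixel_array[i - 1][:image_width] + [0]
--             for i in range(image_height + 2)]
-- ===== Notes on version B (the rewrite author's own statement) =====
-- stated objective: simpler
-- what changed: B builds the padded grid in one comprehension, emitting border rows and padded interior rows ([0] + row[:w] + [0]) directly, instead of preallocating a full zero grid and overwriting every interior cell with doubly-indexed assignments.
-- outside the precondition, e.g. on createZeroPaddedPixelArray([[1]], -1, 1): A returns [[0], [0], [0]], B returns [[0], [0, 0], [0]]; on createZeroPaddedPixelArray([], 0, 1): A returns [[0, 0], [0, 0], [0, 0]], B raises IndexError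
import Mathlib
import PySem

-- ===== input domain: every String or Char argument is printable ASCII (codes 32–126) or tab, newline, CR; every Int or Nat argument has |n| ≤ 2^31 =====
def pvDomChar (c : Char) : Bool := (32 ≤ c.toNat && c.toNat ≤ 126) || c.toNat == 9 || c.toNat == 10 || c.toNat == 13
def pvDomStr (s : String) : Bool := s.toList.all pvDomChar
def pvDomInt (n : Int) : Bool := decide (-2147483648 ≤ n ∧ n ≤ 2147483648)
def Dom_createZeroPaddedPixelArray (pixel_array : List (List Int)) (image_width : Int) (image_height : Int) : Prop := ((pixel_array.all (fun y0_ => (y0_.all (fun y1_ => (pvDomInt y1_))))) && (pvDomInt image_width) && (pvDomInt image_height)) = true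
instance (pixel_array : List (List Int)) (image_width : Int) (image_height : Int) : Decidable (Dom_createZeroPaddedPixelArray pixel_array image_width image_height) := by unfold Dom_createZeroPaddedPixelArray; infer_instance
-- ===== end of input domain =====

-- B builds each padded row by concatenation between two border rows in one pass,
-- instead of preallocating a zero grid and overwriting interior cells (objective: simpler).


-- ===== PORT A =====
def createZeroPaddedPixelArray (pixel_array : List (List Int)) (image_width : Int) (image_height : Int) : List (List Int) :=
  -- padded_array = [[0 for x in range(new_width)] for y in range(new_height)]
  let padded_array := (PySem.List.pyRange 0 (image_height + 2) 1).map
    (fun _ => (PySem.List.pyRange 0 (image_width + 2) 1).map (fun _ => (0 : Int)))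
  -- for i in range(1, image_height+1): for j in range(1, image_width+1): padded_array[i][j] = pixel_array[i-1][j-1]
  (PySem.List.pyRange 1 (image_height + 1) 1).foldl (fun g i =>
    (PySem.List.pyRange 1 (image_width + 1) 1).foldl (fun g j =>
      PySem.List.pySetD g i
        (PySem.List.pySetD (PySem.List.pyGetD g i [])
          j
          (PySem.List.pyGetD (PySem.List.pyGetD pixel_array (i - 1) []) (j - 1) 0))) g)
    padded_array

-- ===== PORT B =====
def createZeroPaddedPixelArray_alt (pixel_array : List (List Int)) (image_width : Int) (image_height : Int) : List (List Int) :=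
  let new_width := image_width + 2
  (PySem.List.pyRange 0 (image_height + 2) 1).map (fun i =>
    if i = 0 ∨ i = image_height + 1 then List.replicate new_width.toNat (0 : Int)
    else [(0 : Int)] ++ PySem.List.slice (PySem.List.pyGetD pixel_array (i - 1) []) none (some image_width) ++ [0])

-- ===== PRECONDITION & SPEC =====
-- Pre_ excludes (a) inputs on which A raises an IndexError (image_height ≥ 1 with too few rows
-- and image_width ≥ 1, or a row among the first image_height shorter than image_width), and
-- (b) inputs with image_height ≥ 1 and image_width < 0, a degenerate corner no caller would
-- specify, where A returns clamped all-zero rows without ever reading pixel_array while B's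
-- concatenated rows differ (or B raises when the rows it would slice are missing).
def Pre_createZeroPaddedPixelArray (pixel_array : List (List Int)) (image_width : Int) (image_height : Int) : Prop :=
  1 ≤ image_height →
    (0 ≤ image_width ∧ image_height.toNat ≤ pixel_array.length ∧
      ∀ r ∈ pixel_array.take image_height.toNat, image_width.toNat ≤ r.length)
instance (pixel_array : List (List Int)) (image_width : Int) (image_height : Int) : Decidable (Pre_createZeroPaddedPixelArray pixel_array image_width image_height) := by unfold Pre_createZeroPaddedPixelArray; infer_instance

def pvWitness_createZeroPaddedPixelArray : List (List Int) × Int × Int := ([[1, 2], [3, 4]], 2, 2)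

def Spec_createZeroPaddedPixelArray (pixel_array : List (List Int)) (image_width : Int) (image_height : Int) (out : List (List Int)) : Prop := out = createZeroPaddedPixelArray_alt pixel_array image_width image_height
instance (pixel_array : List (List Int)) (image_width : Int) (image_height : Int) (out : List (List Int)) : Decidable (Spec_createZeroPaddedPixelArray pixel_array image_width image_height out) := by unfold Spec_createZeroPaddedPixelArray; infer_instance

-- ===== CLAIM (what is proved, stated in full; the proofs are below) =====
def Claim_equal_createZeroPaddedPixelArray : Prop := ∀ (pixel_array : List (List Int)) (image_width : Int) (image_height : Int), Dom_createZeroPaddedPixelArray pixel_array image_width image_height → Pre_createZeroPaddedPixelArray pixel_array image_width image_height → Spec_createZeroPaddedPixelArray pixel_array image_width image_height (createZeroPaddedPixelArray pixel_array image_width image_height)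

-- ===== LEMMAS AND PROOFS =====

-- membership in a longer prefix
theorem pv_mem_take_succ {r : List Int} {pa : List (List Int)} {n : Nat}
    (h : r ∈ pa.take n) : r ∈ pa.take (n + 1) := by
  refine List.mem_of_mem_take (l := pa.take (n + 1)) (i := n) ?_
  rw [List.take_take, Nat.min_eq_left (Nat.le_succ n)]
  exact h

-- a grid-level fold that rewrites only row i equals setting row i to the row-level fold
theorem pv_foldl_set_same {alpha : Type} (js : List Int) (i : Nat)
    (F : List alpha -> Int -> List alpha) :
    forall (g : List (List alpha)),
      js.foldl (fun g' j => g'.set i (F (g'.getD i []) j)) g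
        = g.set i (js.foldl F (g.getD i [])) := by
  induction js with
  | nil =>
    intro g
    simp only [List.foldl_nil]
    rcases Nat.lt_or_ge i g.length with h | h
    · rw [List.getD_eq_getElem _ _ h, List.set_getElem_self]
    · rw [List.set_eq_of_length_le h]
  | cons j js ih =>
    intro g
    by_cases hi : i < g.length
    · simp only [List.foldl_cons]
      rw [ih]
      have h1 : (g.set i (F (g.getD i []) j)).getD i [] = F (g.getD i []) j := by
        rw [List.getD_eq_getElem?_getD, List.getElem?_set_self (by simpa using hi)]
        rfl
      rw [h1, List.set_set]
    · have hset : forall (r : List alpha), g.set i r = g := by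
        intro r; exact List.set_eq_of_length_le (by omega)
      simp only [List.foldl_cons, hset]
      rw [ih, hset]

-- filling positions 1..m of a row whose part beyond position m is `suffix`
theorem pv_fill_row (r : List Int) :
    forall (m : Nat), m <= r.length -> forall (suffix : List Int),
      (List.range m).foldl (fun row k => row.set (k + 1) (r.getD k 0))
          ((0 : Int) :: (List.replicate m 0 ++ suffix))
        = 0 :: (r.take m ++ suffix) := by
  intro m
  induction m with
  | zero => intro _ suffix; simp
  | succ m ih =>
    intro hm suffix
    rw [List.range_succ, List.foldl_append]
    rw [show ((0 : Int) :: (List.replicate (m + 1) 0 ++ suffix))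
        = (0 : Int) :: (List.replicate m 0 ++ ([0] ++ suffix)) by simp [List.replicate_succ']]
    rw [ih (by omega) ([0] ++ suffix)]
    simp only [List.foldl_cons, List.foldl_nil]
    have hlen : (r.take m).length = m := List.length_take_of_le (by omega)
    have hset : ((0 : Int) :: (r.take m ++ ([0] ++ suffix))).set (m + 1) (r.getD m 0)
        = 0 :: (r.take m ++ (r.getD m 0 :: suffix)) := by
      rw [List.set_cons_succ, List.set_append_right _ _ (by omega), hlen]
      simp
    rw [hset, List.getD_eq_getElem _ _ (by omega)]
    rw [List.take_add_one, List.getElem?_eq_getElem (by omega), Option.toList_some,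
      List.append_assoc, List.singleton_append]

-- the inner Python loop on one row, started from an all-zero row of width m+2
theorem pv_inner (r : List Int) (m : Nat) (hm : m <= r.length) :
    (List.range m).foldl (fun row k => row.set (k + 1) (r.getD k 0))
        (List.replicate (m + 2) (0 : Int))
      = 0 :: (r.take m ++ [0]) := by
  rw [show List.replicate (m + 2) (0 : Int) = 0 :: (List.replicate m 0 ++ [0]) by
    rw [show m + 2 = (m + 1) + 1 from rfl, List.replicate_succ, List.replicate_succ']]
  exact pv_fill_row r m hm [0]

-- the row-level fold over pyRange 1 (m+1) is the fold over List.range m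
theorem pv_row_fold (r row : List Int) (m : Nat) :
    (PySem.List.pyRange 1 ((m : Int) + 1) 1).foldl
        (fun row j => PySem.List.pySetD row j (PySem.List.pyGetD r (j - 1) 0)) row
      = (List.range m).foldl (fun row k => row.set (k + 1) (r.getD k 0)) row := by
  rw [PySem.List.pyRange_one]
  rw [show ((m : Int) + 1 - 1).toNat = m by omega]
  rw [List.foldl_map]
  have hf : (fun (row : List Int) (k : Nat) =>
        PySem.List.pySetD row ((1 : Int) + (k : Int)) (PySem.List.pyGetD r ((1 : Int) + (k : Int) - 1) 0))
      = fun row k => row.set (k + 1) (r.getD k 0) := by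
    funext row k
    rw [show (1 : Int) + (k : Int) - 1 = (k : Int) by ring]
    rw [show (1 : Int) + (k : Int) = ((k + 1 : Nat) : Int) by push_cast; ring]
    rw [PySem.List.pySetD_natCast, PySem.List.pyGetD_natCast]
  rw [hf]

-- one full pass of A's outer loop body, for i = k+1
theorem pv_A_step (pa : List (List Int)) (m k : Nat) (g : List (List Int)) :
    (PySem.List.pyRange 1 ((m : Int) + 1) 1).foldl
        (fun g' j => PySem.List.pySetD g' ((1 : Int) + (k : Int))
          (PySem.List.pySetD (PySem.List.pyGetD g' ((1 : Int) + (k : Int)) []) j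
            (PySem.List.pyGetD (PySem.List.pyGetD pa ((1 : Int) + (k : Int) - 1) []) (j - 1) 0))) g
      = g.set (k + 1)
          ((List.range m).foldl (fun row k' => row.set (k' + 1) ((pa.getD k []).getD k' 0))
            (g.getD (k + 1) [])) := by
  have hcast : (1 : Int) + (k : Int) = ((k + 1 : Nat) : Int) := by push_cast; ring
  have hpa : PySem.List.pyGetD pa ((1 : Int) + (k : Int) - 1) [] = pa.getD k [] := by
    rw [show (1 : Int) + (k : Int) - 1 = (k : Int) by ring, PySem.List.pyGetD_natCast]
  have hf : (fun (g' : List (List Int)) (j : Int) =>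
        PySem.List.pySetD g' ((1 : Int) + (k : Int))
          (PySem.List.pySetD (PySem.List.pyGetD g' ((1 : Int) + (k : Int)) []) j
            (PySem.List.pyGetD (PySem.List.pyGetD pa ((1 : Int) + (k : Int) - 1) []) (j - 1) 0)))
      = fun g' j => g'.set (k + 1)
          (PySem.List.pySetD (g'.getD (k + 1) []) j (PySem.List.pyGetD (pa.getD k []) (j - 1) 0)) := by
    funext g' j
    rw [hpa, hcast, PySem.List.pySetD_natCast, PySem.List.pyGetD_natCast]
  rw [hf,
    pv_foldl_set_same (PySem.List.pyRange 1 ((m : Int) + 1) 1) (k + 1)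
      (fun row j => PySem.List.pySetD row j (PySem.List.pyGetD (pa.getD k []) (j - 1) 0)) g,
    pv_row_fold]

-- the outer loop: rows 1..n of the grid become their filled versions
theorem pv_fill_grid (pa : List (List Int)) (m : Nat) :
    forall (n : Nat), n <= pa.length ->
      (forall r, r ∈ pa.take n -> m <= r.length) ->
      forall (suffix : List (List Int)),
      (List.range n).foldl
          (fun g k => g.set (k + 1)
            ((List.range m).foldl (fun row k' => row.set (k' + 1) ((pa.getD k []).getD k' 0))
              (g.getD (k + 1) [])))
          (List.replicate (m + 2) (0 : Int) :: (List.replicate n (List.replicate (m + 2) (0 : Int)) ++ suffix))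
        = List.replicate (m + 2) (0 : Int) ::
            ((pa.take n).map (fun (r : List Int) => (0 : Int) :: (r.take m ++ [0])) ++ suffix) := by
  intro n
  induction n with
  | zero => intro _ _ suffix; simp
  | succ n ih =>
    intro hn hrows suffix
    have hn' : n <= pa.length := by omega
    rw [List.range_succ, List.foldl_append]
    rw [show (List.replicate (m + 2) (0 : Int) ::
          (List.replicate (n + 1) (List.replicate (m + 2) (0 : Int)) ++ suffix))
        = List.replicate (m + 2) (0 : Int) :: (List.replicate n (List.replicate (m + 2) (0 : Int))
            ++ ([List.replicate (m + 2) 0] ++ suffix)) by simp [List.replicate_succ']]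
    rw [ih hn' (fun (r : List Int) hr => hrows r (pv_mem_take_succ hr)) ([List.replicate (m + 2) 0] ++ suffix)]
    simp only [List.foldl_cons, List.foldl_nil]
    have htklen : ((pa.take n).map (fun (r : List Int) => (0 : Int) :: (r.take m ++ [0]))).length = n := by
      simp [Nat.min_eq_left hn']
    have hgetD : ((List.replicate (m + 2) (0 : Int) ::
          ((pa.take n).map (fun (r : List Int) => (0 : Int) :: (r.take m ++ [0]))
            ++ ([List.replicate (m + 2) 0] ++ suffix))).getD (n + 1) [])
        = List.replicate (m + 2) 0 := by
      rw [List.getD_eq_getElem?_getD, List.getElem?_cons_succ,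
        List.getElem?_append_right (by omega), htklen]
      simp
    rw [hgetD]
    have hgetpa : pa.getD n [] = pa[n]'(by omega) := List.getD_eq_getElem _ _ (by omega)
    have hmem : pa[n]'(by omega) ∈ pa.take (n + 1) := by
      have hlt : n < (pa.take (n + 1)).length := by
        simp only [List.length_take]
        omega
      have hmem' := List.getElem_mem hlt
      rwa [List.getElem_take] at hmem'
    rw [hgetpa, pv_inner _ m (hrows _ hmem)]
    have hset : ((List.replicate (m + 2) (0 : Int) ::
          ((pa.take n).map (fun (r : List Int) => (0 : Int) :: (r.take m ++ [0]))
            ++ ([List.replicate (m + 2) 0] ++ suffix))).set (n + 1)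
          (0 :: ((pa[n]'(by omega)).take m ++ [0])))
        = List.replicate (m + 2) (0 : Int) ::
            ((pa.take n).map (fun (r : List Int) => (0 : Int) :: (r.take m ++ [0]))
              ++ ((0 :: ((pa[n]'(by omega)).take m ++ [0])) :: suffix)) := by
      rw [List.set_cons_succ, List.set_append_right _ _ (by omega), htklen]
      simp
    rw [hset]
    rw [List.take_add_one, List.getElem?_eq_getElem (by omega), Option.toList_some,
      List.map_append, List.map_cons, List.map_nil, List.append_assoc, List.singleton_append]

-- range-indexed reads of a prefix ARE the prefix
theorem pv_map_range_getD (pa : List (List Int)) (n : Nat) (hn : n <= pa.length) :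
    (List.range n).map (fun k => pa.getD k []) = pa.take n := by
  apply List.ext_getElem
  · simp [Nat.min_eq_left hn]
  · intro i h1 h2
    simp only [List.getElem_map, List.getElem_range, List.getElem_take]
    exact List.getD_eq_getElem _ _ (by simp at h1; omega)

-- A's port, rewritten in List.range form
theorem pv_A_eq (pa : List (List Int)) (m n : Nat) :
    createZeroPaddedPixelArray pa (m : Int) (n : Int)
      = (List.range n).foldl
          (fun g k => g.set (k + 1)
            ((List.range m).foldl (fun row k' => row.set (k' + 1) ((pa.getD k []).getD k' 0))
              (g.getD (k + 1) [])))
          (List.replicate (n + 2) (List.replicate (m + 2) (0 : Int))) := by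
  unfold createZeroPaddedPixelArray
  dsimp only
  rw [show (n : Int) + 2 = ((n + 2 : Nat) : Int) by push_cast; ring,
      show (m : Int) + 2 = ((m + 2 : Nat) : Int) by push_cast; ring]
  rw [PySem.List.pyRange_zero_natCast, PySem.List.pyRange_zero_natCast]
  rw [List.map_const', List.length_map, List.length_range]
  rw [List.map_const', List.length_map, List.length_range]
  rw [PySem.List.pyRange_one 1 ((n : Int) + 1), show ((n : Int) + 1 - 1).toNat = n by omega, List.foldl_map]
  have hf : (fun (g : List (List Int)) (k : Nat) =>
        (PySem.List.pyRange 1 ((m : Int) + 1) 1).foldl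
          (fun g' j => PySem.List.pySetD g' ((1 : Int) + (k : Int))
            (PySem.List.pySetD (PySem.List.pyGetD g' ((1 : Int) + (k : Int)) []) j
              (PySem.List.pyGetD (PySem.List.pyGetD pa ((1 : Int) + (k : Int) - 1) []) (j - 1) 0))) g)
      = fun g k => g.set (k + 1)
          ((List.range m).foldl (fun row k' => row.set (k' + 1) ((pa.getD k []).getD k' 0))
            (g.getD (k + 1) [])) := by
    funext g k
    exact pv_A_step pa m k g
  rw [hf]

-- B's port for nonnegative dimensions, rewritten in List.range form
theorem pv_B_eq (pa : List (List Int)) (m n : Nat) :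
    createZeroPaddedPixelArray_alt pa (m : Int) (n : Int)
      = List.replicate (m + 2) (0 : Int) ::
          ((List.range n).map (fun (k : Nat) => (0 : Int) :: ((pa.getD k []).take m ++ [0]))
            ++ [List.replicate (m + 2) 0]) := by
  unfold createZeroPaddedPixelArray_alt
  dsimp only
  rw [show ((m : Int) + 2).toNat = m + 2 by omega]
  rw [show (n : Int) + 2 = ((n + 2 : Nat) : Int) by push_cast; ring]
  rw [PySem.List.pyRange_zero_natCast, List.map_map]
  rw [show n + 2 = (n + 1) + 1 from rfl, List.range_succ, List.map_append,
    List.range_succ_eq_map, List.map_cons, List.map_map]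
  have h0 : (if ((0 : Nat) : Int) = 0 ∨ ((0 : Nat) : Int) = (n : Int) + 1
        then List.replicate (m + 2) (0 : Int)
        else [(0 : Int)] ++ PySem.List.slice (PySem.List.pyGetD pa (((0 : Nat) : Int) - 1) []) none (some (m : Int)) ++ [0])
      = List.replicate (m + 2) (0 : Int) := by
    rw [if_pos (Or.inl (by norm_num))]
  have hlast : (if ((n + 1 : Nat) : Int) = 0 ∨ ((n + 1 : Nat) : Int) = (n : Int) + 1
        then List.replicate (m + 2) (0 : Int)
        else [(0 : Int)] ++ PySem.List.slice (PySem.List.pyGetD pa (((n + 1 : Nat) : Int) - 1) []) none (some (m : Int)) ++ [0])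
      = List.replicate (m + 2) (0 : Int) := by
    rw [if_pos (Or.inr (by norm_cast))]
  have hmid : (List.range n).map
        (((fun i => if i = 0 ∨ i = (n : Int) + 1 then List.replicate (m + 2) (0 : Int)
            else [(0 : Int)] ++ PySem.List.slice (PySem.List.pyGetD pa (i - 1) []) none (some (m : Int)) ++ [0])
          ∘ fun (k : Nat) => (k : Int)) ∘ Nat.succ)
      = (List.range n).map (fun (k : Nat) => (0 : Int) :: ((pa.getD k []).take m ++ [0])) := by
    apply List.map_congr_left
    intro k hk
    have hkn : k < n := List.mem_range.mp hk
    simp only [Function.comp_apply]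
    rw [if_neg (by push_cast; omega)]
    rw [show ((Nat.succ k : Nat) : Int) - 1 = (k : Int) by push_cast; ring,
      PySem.List.pyGetD_natCast, PySem.List.slice_to_natCast]
    rfl
  rw [hmid]
  simp only [List.map_cons, List.map_nil, Function.comp_apply, h0, hlast]
  rfl

-- for image_height ≤ 0 both ports return the clamped all-zero grid, for every image_width
theorem pv_nonpos (pa : List (List Int)) (w h : Int) (hh : h <= 0) :
    createZeroPaddedPixelArray pa w h = createZeroPaddedPixelArray_alt pa w h := by
  unfold createZeroPaddedPixelArray createZeroPaddedPixelArray_alt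
  dsimp only
  rw [PySem.List.pyRange_one_eq_nil (by omega : h + 1 <= 1), List.foldl_nil]
  have hborder : (PySem.List.pyRange 0 (w + 2) 1).map (fun _ => (0 : Int))
      = List.replicate (w + 2).toNat (0 : Int) := by
    rw [PySem.List.pyRange_one, show w + 2 - 0 = w + 2 by ring, List.map_map]
    simp only [Function.comp_def]
    rw [List.map_const', List.length_range]
  apply List.map_congr_left
  intro i hi
  have hmem := PySem.List.mem_pyRange_one.mp hi
  rw [if_pos (by omega : i = 0 ∨ i = h + 1), hborder]

-- ===== VERDICT (by name: the statement is the Claim_ definition above) =====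
theorem createZeroPaddedPixelArray_spec : Claim_equal_createZeroPaddedPixelArray := by
  intro pa w h _ hpre
  unfold Spec_createZeroPaddedPixelArray
  by_cases hh : h <= 0
  · exact pv_nonpos pa w h hh
  · obtain ⟨hw, hlen, hrows⟩ := hpre (by omega)
    lift w to Nat using hw with m
    lift h to Nat using (by omega : (0 : Int) <= h) with n
    simp only [Int.toNat_natCast] at hlen hrows
    rw [pv_A_eq, pv_B_eq]
    have hgridinit : ∀ (X : List Int) (k : Nat),
        List.replicate (k + 2) X = X :: (List.replicate k X ++ [X]) := by
      intro X k
      induction k with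
      | zero => rfl
      | succ k ih =>
        show X :: List.replicate (k + 2) X = X :: (List.replicate (k + 1) X ++ [X])
        rw [ih, List.replicate_succ, List.cons_append]
    rw [hgridinit (List.replicate (m + 2) (0 : Int)) n]
    rw [pv_fill_grid pa m n hlen (fun r hr => hrows r hr) [List.replicate (m + 2) 0]]
    rw [show (List.range n).map (fun (k : Nat) => (0 : Int) :: ((pa.getD k []).take m ++ [0]))
        = (pa.take n).map (fun (r : List Int) => (0 : Int) :: (r.take m ++ [0])) by
      rw [← pv_map_range_getD pa n hlen, List.map_map]; rfl]
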